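-- pv_equiv track=rewrite | github.com/Sodz99/multi-agent-fault-diagnosis | src/fault_diagnosis/agents/crew_orchestration.py | _extract_runbook_essentials
-- ===== SOURCE A (Python) =====
-- from typing import Dict, Any, List, Optional
--
-- def _extract_runbook_essentials(content: str) -> Dict[str, Any]:
--     """Extract essential information from runbook fixtures."""
--     lines = content.split('\n')
--     steps = []
--
--     for line in lines:
--         line = line.strip()
--         if line and (line.startswith(('1.', '2.', '3.', '4.', '5.')) or line.startswith('- ')):
--             steps.append(line[:100])  # Truncate long steps
--
--     return {
--         'procedure_steps': steps[:10],  # Max 10 steps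
--         'key_actions': [step for step in steps if any(keyword in step.lower()
--                       for keyword in ['escalate', 'rebalance', 'validate', 'inspect'])][:5]
--     }
-- ===== SOURCE B (Python) =====
-- def _extract_runbook_essentials(content: str):
--     """Single-pass variant: both capped accumulators are filled during one scan of the lines."""
--     keywords = ('escalate', 'rebalance', 'validate', 'inspect')
--     prefixes = ('1.', '2.', '3.', '4.', '5.', '- ')
--     procedure_steps = []
--     key_actions = []
--     for raw in content.split('\n'):
--         line = raw.strip()
--         if line[:2] in prefixes:
--             t = line[:100]
--             if len(procedure_steps) < 10:
--                 procedure_steps.append(t)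
--             if len(key_actions) < 5 and any(k in t.lower() for k in keywords):
--                 key_actions.append(t)
--     return {'procedure_steps': procedure_steps, 'key_actions': key_actions}
-- ===== Notes on version B (the rewrite author's own statement) =====
-- stated objective: alternative
-- what changed: B replaces A's three passes (collect all matching steps, then slice the first 10, then filter-and-slice for key actions) by one loop over the lines that fills both capped accumulators directly, testing the prefix with line[:2] membership instead of startswith chains, and returns them without post-hoc slicing.
import Mathlib
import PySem

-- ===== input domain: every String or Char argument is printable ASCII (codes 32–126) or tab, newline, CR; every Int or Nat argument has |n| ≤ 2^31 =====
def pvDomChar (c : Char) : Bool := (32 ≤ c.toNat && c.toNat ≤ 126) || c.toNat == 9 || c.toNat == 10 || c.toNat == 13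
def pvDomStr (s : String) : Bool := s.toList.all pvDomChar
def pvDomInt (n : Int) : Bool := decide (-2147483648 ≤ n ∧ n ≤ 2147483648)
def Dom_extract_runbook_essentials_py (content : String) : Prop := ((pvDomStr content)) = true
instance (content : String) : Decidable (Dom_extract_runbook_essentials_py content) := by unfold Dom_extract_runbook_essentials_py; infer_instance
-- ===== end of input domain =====

-- B performs the same extraction in ONE pass with two capped accumulators instead of A's collect-all-then-slice-then-filter passes; same results, same cost (objective: alternative).

-- ===== PORT A =====
def pvKeywords : List String := ["escalate", "rebalance", "validate", "inspect"]

def extract_runbook_essentials_py (content : String) : List (String × List String) :=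
  let lines := (PySem.Str.split? content "\n").getD []
  let steps := lines.foldl (fun steps line0 =>
    let line := PySem.Str.strip line0
    if (line != "") && (PySem.Str.startswith line "1." || PySem.Str.startswith line "2." ||
        PySem.Str.startswith line "3." || PySem.Str.startswith line "4." ||
        PySem.Str.startswith line "5." || PySem.Str.startswith line "- ") then
      steps ++ [PySem.Str.slice line none (some 100)]
    else steps) []
  [("procedure_steps", PySem.List.slice steps none (some 10)),
   ("key_actions",
     PySem.List.slice
       (steps.filter (fun step => pvKeywords.any (fun k => PySem.Str.isIn k (PySem.Str.lower step))))
       none (some 5))]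

-- ===== PORT B =====
def pvPrefixes : List String := ["1.", "2.", "3.", "4.", "5.", "- "]

def extract_runbook_essentials_py_alt (content : String) : List (String × List String) :=
  let lines := (PySem.Str.split? content "\n").getD []
  let acc := lines.foldl (fun (acc : List String × List String) raw =>
    let line := PySem.Str.strip raw
    if pvPrefixes.contains (PySem.Str.slice line none (some 2)) then
      let t := PySem.Str.slice line none (some 100)
      (if acc.1.length < 10 then acc.1 ++ [t] else acc.1,
       if acc.2.length < 5 && pvKeywords.any (fun k => PySem.Str.isIn k (PySem.Str.lower t)) then
         acc.2 ++ [t]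
       else acc.2)
    else acc) ([], [])
  [("procedure_steps", acc.1), ("key_actions", acc.2)]

-- ===== PRECONDITION & SPEC =====
def Spec_extract_runbook_essentials_py (content : String) (out : List (String × List String)) : Prop := out = extract_runbook_essentials_py_alt content
instance (content : String) (out : List (String × List String)) : Decidable (Spec_extract_runbook_essentials_py content out) := by unfold Spec_extract_runbook_essentials_py; infer_instance

-- ===== CLAIM (what is proved, stated in full; the proofs are below) =====
def Claim_equal_extract_runbook_essentials_py : Prop := ∀ (content : String), Dom_extract_runbook_essentials_py content → Spec_extract_runbook_essentials_py content (extract_runbook_essentials_py content)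

-- ===== LEMMAS AND PROOFS =====

-- String == is equality of the character lists
theorem pv_beq_toList (s t : String) : (s == t) = decide (s.toList = t.toList) := by
  rw [Bool.beq_eq_decide_eq]; simp [String.toList_inj]

-- on character lists, 'take 2 ∈ two-char prefixes' is A's nonempty-and-startswith test
theorem pv_cond_chars (cs : List Char) :
  ((decide (cs.take 2 = ['1','.'])) || decide (cs.take 2 = ['2','.']) || decide (cs.take 2 = ['3','.']) ||
   decide (cs.take 2 = ['4','.']) || decide (cs.take 2 = ['5','.']) || decide (cs.take 2 = ['-',' '])) =
  ((!decide (cs = [])) && (PySem.Chars.startswith cs ['1','.'] || PySem.Chars.startswith cs ['2','.'] ||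
      PySem.Chars.startswith cs ['3','.'] || PySem.Chars.startswith cs ['4','.'] ||
      PySem.Chars.startswith cs ['5','.'] || PySem.Chars.startswith cs ['-',' '])) := by
  match cs with
  | [] => decide
  | [a] => simp [PySem.Chars.startswith, List.isPrefixOf, List.take]
  | a :: b :: t =>
    simp [PySem.Chars.startswith, List.isPrefixOf, List.take, Bool.beq_eq_decide_eq, eq_comm]

-- B's guard (line[:2] in prefixes) coincides with A's guard on every string
theorem pv_cond_eq (s : String) :
  pvPrefixes.contains (PySem.Str.slice s none (some 2)) =
  ((s != "") && (PySem.Str.startswith s "1." || PySem.Str.startswith s "2." ||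
      PySem.Str.startswith s "3." || PySem.Str.startswith s "4." ||
      PySem.Str.startswith s "5." || PySem.Str.startswith s "- ")) := by
  have h2 : PySem.List.slice s.toList none (some 2) = s.toList.take 2 :=
    PySem.List.slice_to s.toList (by norm_num)
  simp only [pvPrefixes, List.contains_cons, List.contains_nil, Bool.or_false,
    pv_beq_toList, bne, PySem.Str.slice, PySem.Str.startswith_eq]
  simp only [String.toList_ofList, PySem.Chars.slice_eq_listSlice, h2]
  have := pv_cond_chars s.toList
  simp only [show ("1.":String).toList = ['1','.'] from rfl, show ("2.":String).toList = ['2','.'] from rfl,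
    show ("3.":String).toList = ['3','.'] from rfl, show ("4.":String).toList = ['4','.'] from rfl,
    show ("5.":String).toList = ['5','.'] from rfl, show ("- ":String).toList = ['-',' '] from rfl,
    show ("":String).toList = [] from rfl] at *
  rw [← this]
  simp [Bool.or_assoc]

theorem pv_take_snoc {α : Type} (s : List α) (x : α) (n : Nat) :
    (s ++ [x]).take n = if s.length < n then s.take n ++ [x] else s.take n := by
  rw [List.take_append]
  by_cases h : s.length < n
  · have h1 : n - s.length = (n - s.length - 1) + 1 := by omega
    rw [h1]; simp [h]
  · have h1 : n - s.length = 0 := by omega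
    simp [h, h1]

-- appending under a length cap is taking the cap of the appended list
theorem pv_take_acc {α : Type} (s : List α) (x : α) (n : Nat) :
    (if (s.take n).length < n then s.take n ++ [x] else s.take n) = (s ++ [x]).take n := by
  rw [pv_take_snoc]
  have h : ((s.take n).length < n) ↔ (s.length < n) := by
    simp only [List.length_take]; omega
  simp only [h]

-- the key-action accumulator: appending under the cap when the predicate holds is take-of-filter of the appended list
theorem pv_filter_take_acc {α : Type} (s : List α) (x : α) (p : α → Bool) (n : Nat) :
    (if ((s.filter p).take n).length < n && p x then (s.filter p).take n ++ [x] else (s.filter p).take n)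
    = ((s ++ [x]).filter p).take n := by
  rw [List.filter_append]
  cases hp : p x
  · simp [hp, List.filter]
  · simp only [hp, Bool.and_true, List.filter_cons, if_pos, List.filter_nil, decide_eq_true_eq]
    exact pv_take_acc (s.filter p) x n

-- B's one fold with both capped accumulators tracks A's steps list: at every point the pair is (take 10, take 5 ∘ filter) of A's accumulator
theorem pv_fold (lines : List String) (s : List String) :
    lines.foldl (fun (acc : List String × List String) raw =>
      let line := PySem.Str.strip raw
      if pvPrefixes.contains (PySem.Str.slice line none (some 2)) then
        let t := PySem.Str.slice line none (some 100)
        (if acc.1.length < 10 then acc.1 ++ [t] else acc.1,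
         if acc.2.length < 5 && pvKeywords.any (fun k => PySem.Str.isIn k (PySem.Str.lower t)) then
           acc.2 ++ [t]
         else acc.2)
      else acc)
      (s.take 10, ((s.filter (fun step => pvKeywords.any (fun k => PySem.Str.isIn k (PySem.Str.lower step)))).take 5))
    = ((lines.foldl (fun steps line0 =>
          let line := PySem.Str.strip line0
          if (line != "") && (PySem.Str.startswith line "1." || PySem.Str.startswith line "2." ||
              PySem.Str.startswith line "3." || PySem.Str.startswith line "4." ||
              PySem.Str.startswith line "5." || PySem.Str.startswith line "- ") then
            steps ++ [PySem.Str.slice line none (some 100)]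
          else steps) s).take 10,
       ((lines.foldl (fun steps line0 =>
          let line := PySem.Str.strip line0
          if (line != "") && (PySem.Str.startswith line "1." || PySem.Str.startswith line "2." ||
              PySem.Str.startswith line "3." || PySem.Str.startswith line "4." ||
              PySem.Str.startswith line "5." || PySem.Str.startswith line "- ") then
            steps ++ [PySem.Str.slice line none (some 100)]
          else steps) s).filter
            (fun step => pvKeywords.any (fun k => PySem.Str.isIn k (PySem.Str.lower step)))).take 5) := by
  induction lines generalizing s with
  | nil => rfl
  | cons l ls ih =>
    simp only [List.foldl_cons, ← pv_cond_eq (PySem.Str.strip l)]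
    by_cases hc : pvPrefixes.contains (PySem.Str.slice (PySem.Str.strip l) none (some 2)) = true
    · simp only [hc, if_true]
      rw [pv_take_acc, pv_filter_take_acc]
      exact ih (s ++ [PySem.Str.slice (PySem.Str.strip l) none (some 100)])
    · simp only [Bool.not_eq_true] at hc
      simp only [hc, Bool.false_eq_true, if_false]
      exact ih s

-- ===== VERDICT (by name: the statement is the Claim_ definition above) =====
theorem extract_runbook_essentials_py_spec : Claim_equal_extract_runbook_essentials_py := by
  intro content _
  unfold Spec_extract_runbook_essentials_py
  simp only [extract_runbook_essentials_py, extract_runbook_essentials_py_alt]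
  have h := pv_fold ((PySem.Str.split? content "\n").getD []) []
  simp only [List.take_nil, List.filter_nil] at h
  rw [PySem.List.slice_to _ (by norm_num), PySem.List.slice_to _ (by norm_num)]
  simp only [show Int.toNat 10 = 10 from rfl, show Int.toNat 5 = 5 from rfl, h]
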